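-- pv_equiv track=rewrite | github.com/datawhales/Python-Code-Notes | ps/candidate_key.py | check_minimality
-- ===== SOURCE A (Python) =====
-- def check_minimality(keys):
--     # keys = [(0,), (0, 1), (0, 2), (0, 3), (1, 2), (0, 1, 2), (0, 1, 3), (0, 2, 3), (1, 2, 3), (0, 1, 2, 3)]
--     # 와 같은 형태로 주어졌을 때 최소성을 만족하는 key만을 남기는 함수
--     new_keys = []
--     for key in keys:
--         if len(key) == 1:
--             new_keys.append(key)
--             continue
--         if not any([set(final_key).issubset(key) for final_key in new_keys]):
--             new_keys.append(key)
--     return new_keys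
-- ===== SOURCE B (Python) =====
-- def check_minimality(keys):
--     # A key is kept iff it is a singleton or NO earlier key's element set is
--     # contained in it: by transitivity of set inclusion, checking every earlier
--     # key is equivalent to checking only the kept ones.
--     out = []
--     prev = []
--     for key in keys:
--         s = set(key)
--         if len(key) == 1 or not any(p <= s for p in prev):
--             out.append(key)
--         prev.append(s)
--     return out
-- ===== Notes on version B (the rewrite author's own statement) =====
-- stated objective: faster
-- what changed: B drops A's kept-list bookkeeping: by transitivity of set inclusion a key is minimal iff it is a singleton or no earlier key's element set (kept or not) is contained in it, so B tests against precomputed sets of all previous keys, building each set once and short-circuiting, where A rebuilds set(final_key) for every pair inside a fully materialized list comprehension.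
import Mathlib
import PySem

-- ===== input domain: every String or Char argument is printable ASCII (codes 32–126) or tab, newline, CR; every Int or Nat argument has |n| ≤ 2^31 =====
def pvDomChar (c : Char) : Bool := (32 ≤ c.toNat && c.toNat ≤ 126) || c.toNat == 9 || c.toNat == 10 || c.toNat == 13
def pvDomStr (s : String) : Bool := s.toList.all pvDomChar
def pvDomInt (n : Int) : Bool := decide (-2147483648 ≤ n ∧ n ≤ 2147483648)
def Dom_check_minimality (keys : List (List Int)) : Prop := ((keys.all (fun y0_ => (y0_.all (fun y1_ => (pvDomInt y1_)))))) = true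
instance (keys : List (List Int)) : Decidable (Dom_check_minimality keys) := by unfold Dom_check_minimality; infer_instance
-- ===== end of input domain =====

-- B drops A's kept-list bookkeeping: by transitivity of set inclusion a key is kept
-- iff it is a singleton or no earlier key's element set is contained in it; B builds each
-- key's set once instead of per comparison (objective: faster, constant-factor).

-- ===== PORT A =====
def check_minimality (keys : List (List Int)) : List (List Int) :=
  keys.foldl (fun new_keys key =>
    if key.length = 1 then new_keys ++ [key]
    else if !((new_keys.map (fun final_key =>
            PySem.Set.issubset (PySem.Set.ofList final_key) key)).any id) then
      new_keys ++ [key]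
    else new_keys) []

-- ===== PORT B =====
-- state: (out, prev) — prev holds set(key) of EVERY key seen so far
def check_minimality_alt (keys : List (List Int)) : List (List Int) :=
  (keys.foldl (fun (st : List (List Int) × List (PySem.Set Int)) key =>
      let s := PySem.Set.ofList key
      ((if key.length = 1 ∨ !(st.2.any (fun p => PySem.Set.issubset p s)) then
          st.1 ++ [key]
        else st.1),
       st.2 ++ [s]))
    ([], [])).1

-- ===== PRECONDITION & SPEC =====
def Spec_check_minimality (keys : List (List Int)) (out : List (List Int)) : Prop := out = check_minimality_alt keys
instance (keys : List (List Int)) (out : List (List Int)) : Decidable (Spec_check_minimality keys out) := by unfold Spec_check_minimality; infer_instance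

-- ===== CLAIM (what is proved, stated in full; the proofs are below) =====
def Claim_equal_check_minimality : Prop := ∀ (keys : List (List Int)), Dom_check_minimality keys → Spec_check_minimality keys (check_minimality keys)

-- ===== LEMMAS AND PROOFS =====

-- A's guard as a proposition
theorem subA_iff (nk : List (List Int)) (key : List Int) :
    ((nk.map (fun fk => PySem.Set.issubset (PySem.Set.ofList fk) key)).any id) = true
      ↔ ∃ fk ∈ nk, ∀ x ∈ fk, x ∈ key := by
  simp only [List.any_map, List.any_eq_true, Function.comp, id]
  constructor
  · rintro ⟨fk, hfk, hs⟩
    refine ⟨fk, hfk, fun x hx => ?_⟩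
    exact (PySem.Set.issubset_iff (PySem.Set.ofList fk) key).mp hs x
      ((PySem.Set.mem_ofList _ _).mpr hx)
  · rintro ⟨fk, hfk, hs⟩
    exact ⟨fk, hfk, (PySem.Set.issubset_iff _ _).mpr
      fun x hx => hs x ((PySem.Set.mem_ofList _ _).mp hx)⟩

-- B's guard as a proposition
theorem subB_iff (prev : List (PySem.Set Int)) (key : List Int) :
    (prev.any (fun p => PySem.Set.issubset p (PySem.Set.ofList key))) = true
      ↔ ∃ p ∈ prev, ∀ x ∈ p, x ∈ key := by
  simp only [List.any_eq_true]
  constructor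
  · rintro ⟨p, hp, hs⟩
    refine ⟨p, hp, fun x hx => ?_⟩
    exact (PySem.Set.mem_ofList _ _).mp
      ((PySem.Set.issubset_iff p (PySem.Set.ofList key)).mp hs x hx)
  · rintro ⟨p, hp, hs⟩
    exact ⟨p, hp, (PySem.Set.issubset_iff _ _).mpr
      fun x hx => (PySem.Set.mem_ofList _ _).mpr (hs x hx)⟩

-- the two guards agree under the loop invariant:
-- (h1) every earlier key's set contains the set of some kept key, and
-- (h2) every kept key's set is among the earlier keys' sets
theorem guard_eq (nk : List (List Int)) (prev : List (PySem.Set Int)) (key : List Int)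
    (h1 : ∀ p ∈ prev, ∃ fk ∈ nk, ∀ x ∈ fk, x ∈ p)
    (h2 : ∀ fk ∈ nk, PySem.Set.ofList fk ∈ prev) :
    (prev.any (fun p => PySem.Set.issubset p (PySem.Set.ofList key)))
      = ((nk.map (fun fk => PySem.Set.issubset (PySem.Set.ofList fk) key)).any id) := by
  by_cases h : ∃ fk ∈ nk, ∀ x ∈ fk, x ∈ key
  · rcases h with ⟨fk, hfk, hs⟩
    rw [(subA_iff nk key).mpr ⟨fk, hfk, hs⟩]
    refine (subB_iff prev key).mpr ⟨PySem.Set.ofList fk, h2 fk hfk, ?_⟩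
    intro x hx
    exact hs x ((PySem.Set.mem_ofList _ _).mp hx)
  · have hA : ((nk.map (fun fk => PySem.Set.issubset (PySem.Set.ofList fk) key)).any id) = false :=
      Bool.eq_false_iff.mpr (fun ht => h ((subA_iff nk key).mp ht))
    have hB : (prev.any (fun p => PySem.Set.issubset p (PySem.Set.ofList key))) = false := by
      refine Bool.eq_false_iff.mpr (fun ht => ?_)
      rcases (subB_iff prev key).mp ht with ⟨p, hp, hps⟩
      rcases h1 p hp with ⟨fk, hfk, hfp⟩
      exact h ⟨fk, hfk, fun x hx => hps x (hfp x hx)⟩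
    rw [hA, hB]

theorem loop_eq (keys : List (List Int)) (nk : List (List Int)) (prev : List (PySem.Set Int))
    (h1 : ∀ p ∈ prev, ∃ fk ∈ nk, ∀ x ∈ fk, x ∈ p)
    (h2 : ∀ fk ∈ nk, PySem.Set.ofList fk ∈ prev) :
    (keys.foldl (fun (st : List (List Int) × List (PySem.Set Int)) key =>
        let s := PySem.Set.ofList key
        ((if key.length = 1 ∨ !(st.2.any (fun p => PySem.Set.issubset p s)) then
            st.1 ++ [key]
          else st.1),
         st.2 ++ [s])) (nk, prev)).1
      = keys.foldl (fun new_keys key =>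
          if key.length = 1 then new_keys ++ [key]
          else if !((new_keys.map (fun final_key =>
                  PySem.Set.issubset (PySem.Set.ofList final_key) key)).any id) then
            new_keys ++ [key]
          else new_keys) nk := by
  induction keys generalizing nk prev with
  | nil => rfl
  | cons key rest ih =>
    have hg := guard_eq nk prev key h1 h2
    -- invariants after appending key to prev, whether or not it is kept
    have h1_keep : ∀ p ∈ prev ++ [PySem.Set.ofList key],
        ∃ fk ∈ nk ++ [key], ∀ x ∈ fk, x ∈ p := by
      intro p hp
      rcases List.mem_append.mp hp with h | h
      · rcases h1 p h with ⟨fk, hfk, hs⟩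
        exact ⟨fk, List.mem_append.mpr (Or.inl hfk), hs⟩
      · refine ⟨key, List.mem_append.mpr (Or.inr (List.mem_singleton_self key)), ?_⟩
        intro x hx
        rw [List.mem_singleton.mp h]
        exact (PySem.Set.mem_ofList _ _).mpr hx
    have h2_keep : ∀ fk ∈ nk ++ [key],
        PySem.Set.ofList fk ∈ prev ++ [PySem.Set.ofList key] := by
      intro fk hfk
      rcases List.mem_append.mp hfk with h | h
      · exact List.mem_append.mpr (Or.inl (h2 fk h))
      · exact List.mem_append.mpr (Or.inr (by rw [List.mem_singleton.mp h]; exact List.mem_singleton_self _))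
    have h2_skip : ∀ fk ∈ nk, PySem.Set.ofList fk ∈ prev ++ [PySem.Set.ofList key] :=
      fun fk h => List.mem_append.mpr (Or.inl (h2 fk h))
    simp only [List.foldl_cons, hg]
    by_cases hlen : key.length = 1
    · rw [if_pos (Or.inl hlen), if_pos hlen]
      exact ih _ _ h1_keep h2_keep
    · rw [if_neg hlen]
      by_cases hany : ((nk.map (fun fk => PySem.Set.issubset (PySem.Set.ofList fk) key)).any id) = true
      · rw [hany, if_neg (by simp [hlen]), if_neg (by simp)]
        have h1_skip : ∀ p ∈ prev ++ [PySem.Set.ofList key],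
            ∃ fk ∈ nk, ∀ x ∈ fk, x ∈ p := by
          intro p hp
          rcases List.mem_append.mp hp with h | h
          · exact h1 p h
          · rcases (subA_iff nk key).mp hany with ⟨fk, hfk, hs⟩
            refine ⟨fk, hfk, fun x hx => ?_⟩
            rw [List.mem_singleton.mp h]
            exact (PySem.Set.mem_ofList _ _).mpr (hs x hx)
        exact ih _ _ h1_skip h2_skip
      · have hf : ((nk.map (fun fk => PySem.Set.issubset (PySem.Set.ofList fk) key)).any id) = false :=
          Bool.eq_false_iff.mpr hany
        rw [hf, if_pos (Or.inr (by decide : (!false) = true)), if_pos (by decide : (!false) = true)]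
        exact ih _ _ h1_keep h2_keep

-- ===== VERDICT (by name: the statement is the Claim_ definition above) =====
theorem check_minimality_spec : Claim_equal_check_minimality := by
  intro keys _
  unfold Spec_check_minimality check_minimality check_minimality_alt
  exact (loop_eq keys [] [] (by simp) (by simp)).symm
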